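-- pv_equiv track=rewrite | github.com/SciTools/iris | tools/env_listing.py | sanitise_lines
-- ===== SOURCE A (Python) =====
-- def sanitise_lines(lines, header_line_hint=None):
--     """
--     Split string by spaces, removing leading, trailing and repeated whitespace.
--     Remove header lines up to the last one containing 'header_line_hint'.
--
--     """
--     pkg_info = []
--     for line in lines:
--         line = line.strip()
--         while '\t' in line:
--             line = line.replace('\t', ' ')
--         while '  ' in line:
--             ...
--             line = line.replace('  ', ' ')
--         line = line.split(' ')
--         if len(line) > 0 and line[0] not in ('', '#'):
--             pkg_info.append(line)
--
--     pkg_keys = [pkg[0] for pkg in pkg_info]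
--     if header_line_hint is not None:
--         header_inds = [ind for ind, key in enumerate(pkg_keys)
--                        if header_line_hint in key]
--         if len(header_inds) > 0:
--             pkg_info = pkg_info[header_inds[-1] + 1:]
--
--     result = {pkg[0]: pkg[1:] for pkg in pkg_info}
--     return result
-- ===== SOURCE B (Python) =====
-- def sanitise_lines(lines, header_line_hint=None):
--     """Single accumulating pass: build the dict directly, resetting it at each
--     header row, instead of collecting all rows and slicing after the last header."""
--     result = {}
--     for line in lines:
--         line = line.strip()
--         while '\t' in line:
--             line = line.replace('\t', ' ')
--         while '  ' in line:
--             line = line.replace('  ', ' ')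
--         toks = line.split(' ')
--         key = toks[0]
--         if key in ('', '#'):
--             continue
--         if header_line_hint is not None and header_line_hint in key:
--             result = {}
--             continue
--         result[key] = toks[1:]
--     return result
-- ===== Notes on version B (the rewrite author's own statement) =====
-- stated objective: simpler
-- what changed: B replaces A's collect-all-rows / enumerate-and-filter-for-header-indices / slice / dict-comprehension pipeline by a single accumulating pass that inserts key->fields into the dict directly and resets the dict at each header row, so the pkg_info list, pkg_keys list and header-index scan disappear.
import Mathlib
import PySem

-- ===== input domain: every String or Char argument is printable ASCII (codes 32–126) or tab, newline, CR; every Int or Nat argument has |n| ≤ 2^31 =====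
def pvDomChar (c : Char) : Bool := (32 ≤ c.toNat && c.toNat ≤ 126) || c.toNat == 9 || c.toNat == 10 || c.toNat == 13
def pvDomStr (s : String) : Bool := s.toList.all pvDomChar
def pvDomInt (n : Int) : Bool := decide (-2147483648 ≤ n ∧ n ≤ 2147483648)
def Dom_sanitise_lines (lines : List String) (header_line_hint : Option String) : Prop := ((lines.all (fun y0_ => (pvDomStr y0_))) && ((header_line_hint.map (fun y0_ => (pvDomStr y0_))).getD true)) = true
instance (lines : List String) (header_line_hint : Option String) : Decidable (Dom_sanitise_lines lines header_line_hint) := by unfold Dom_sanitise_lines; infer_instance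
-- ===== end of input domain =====

-- B replaces A's collect-rows / find-last-header-index / slice / dict-comprehension pipeline by a
-- single accumulating pass that inserts into the dict directly and resets it at each header row
-- (objective: simpler; the per-line whitespace normalisation is unchanged and shared below).

-- shared per-line normalisation (identical in both Pythons): strip, while-replace tabs, while-collapse
-- double spaces, split on ' '.  The while loops are fuel recursions; fuel len+1 is enough because each
-- replace of "  " by " " shortens the string and replace of "\t" removes every tab.
def pvDetab : Nat → String → String
  | 0, s => s
  | f + 1, s => if PySem.Str.isIn "\t" s then pvDetab f (PySem.Str.replace s "\t" " ") else s

def pvCollapse : Nat → String → String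
  | 0, s => s
  | f + 1, s => if PySem.Str.isIn "  " s then pvCollapse f (PySem.Str.replace s "  " " ") else s

def pvNormLine (line : String) : List String :=
  let s := PySem.Str.strip line
  let s := pvDetab (s.length + 1) s
  let s := pvCollapse (s.length + 1) s
  (PySem.Str.split? s " ").getD []

-- ===== PORT A =====
def sanitise_lines (lines : List String) (header_line_hint : Option String) : List (String × List String) :=
  let pkg_info : List (List String) := lines.foldl (fun acc line =>
    let toks := pvNormLine line
    if toks.length > 0 && PySem.List.pyGetD toks 0 "" != "" && PySem.List.pyGetD toks 0 "" != "#"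
    then acc ++ [toks] else acc) []
  let pkg_keys := pkg_info.map (fun pkg => PySem.List.pyGetD pkg 0 "")
  let pkg_info2 := match header_line_hint with
    | none => pkg_info
    | some hint =>
        let header_inds := ((PySem.List.enumerate pkg_keys 0).filter
          (fun q : Int × String => PySem.Str.isIn hint q.2)).map (fun q : Int × String => q.1)
        if header_inds.length > 0 then
          PySem.List.slice pkg_info (some (PySem.List.pyGetD header_inds (-1) 0 + 1)) none
        else pkg_info
  (pkg_info2.foldl (fun (d : PySem.Dict String (List String)) pkg =>
      d.insert (PySem.List.pyGetD pkg 0 "") (PySem.List.slice pkg (some 1) none))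
    (PySem.Dict.empty : PySem.Dict String (List String))).items

-- ===== PORT B =====
def sanitise_lines_alt (lines : List String) (header_line_hint : Option String) : List (String × List String) :=
  (lines.foldl (fun d line =>
      let toks := pvNormLine line
      let key := PySem.List.pyGetD toks 0 ""
      if key == "" || key == "#" then d
      else if header_line_hint.any (fun hint => PySem.Str.isIn hint key) then PySem.Dict.empty
      else d.insert key (PySem.List.slice toks (some 1) none))
    (PySem.Dict.empty : PySem.Dict String (List String))).items

-- ===== PRECONDITION & SPEC =====
def Spec_sanitise_lines (lines : List String) (header_line_hint : Option String) (out : List (String × List String)) : Prop := out = sanitise_lines_alt lines header_line_hint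
instance (lines : List String) (header_line_hint : Option String) (out : List (String × List String)) : Decidable (Spec_sanitise_lines lines header_line_hint out) := by unfold Spec_sanitise_lines; infer_instance

-- ===== CLAIM (what is proved, stated in full; the proofs are below) =====
def Claim_equal_sanitise_lines : Prop := ∀ (lines : List String) (header_line_hint : Option String), Dom_sanitise_lines lines header_line_hint → Spec_sanitise_lines lines header_line_hint (sanitise_lines lines header_line_hint)


-- ===== LEMMAS AND PROOFS =====

-- proof-side vocabulary: key/keep/header tests on a normalised token list,
-- the two loop bodies, and the suffix of rows after the last header row
def pvKey (t : List String) : String := PySem.List.pyGetD t 0 ""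
def pvKeep (t : List String) : Bool := pvKey t != "" && pvKey t != "#"
def pvHdr (hint : String) (t : List String) : Bool := PySem.Str.isIn hint (pvKey t)
def pvIns (d : PySem.Dict String (List String)) (t : List String) : PySem.Dict String (List String) :=
  d.insert (pvKey t) (PySem.List.slice t (some 1) none)
def pvStepB (hint : String) (d : PySem.Dict String (List String)) (t : List String) :
    PySem.Dict String (List String) :=
  if pvHdr hint t then PySem.Dict.empty else pvIns d t
def pvStepB' (hint? : Option String) (d : PySem.Dict String (List String)) (toks : List String) :
    PySem.Dict String (List String) :=
  if PySem.List.pyGetD toks 0 "" == "" || PySem.List.pyGetD toks 0 "" == "#" then d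
  else if hint?.any (fun hint => PySem.Str.isIn hint (PySem.List.pyGetD toks 0 "")) then PySem.Dict.empty
  else d.insert (PySem.List.pyGetD toks 0 "") (PySem.List.slice toks (some 1) none)

theorem pvSkip_eq_not_keep (t : List String) :
    (pvKey t == "" || pvKey t == "#") = !pvKeep t := by
  have habs : ∀ a b : Bool, (a || b) = !(!a && !b) := by decide
  rw [habs]; rfl

theorem pvKeep_eq_keepA (t : List String) :
    (t.length > 0 && PySem.List.pyGetD t 0 "" != "" && PySem.List.pyGetD t 0 "" != "#") = pvKeep t := by
  cases t <;> simp [pvKeep, pvKey, PySem.List.pyGetD, PySem.List.pyGet?]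

theorem pkg_info_eq (lines : List String) :
    (lines.foldl (fun acc line =>
      let toks := pvNormLine line
      if toks.length > 0 && PySem.List.pyGetD toks 0 "" != "" && PySem.List.pyGetD toks 0 "" != "#"
      then acc ++ [toks] else acc) []) = (lines.map pvNormLine).filter pvKeep := by
  have hfun : (fun (acc : List (List String)) (line : String) =>
      let toks := pvNormLine line
      if toks.length > 0 && PySem.List.pyGetD toks 0 "" != "" && PySem.List.pyGetD toks 0 "" != "#"
      then acc ++ [toks] else acc)
    = fun acc line => if pvKeep (pvNormLine line) then acc ++ [pvNormLine line] else acc := by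
    funext acc line
    simp only [pvKeep_eq_keepA]
  rw [hfun, PySem.List.foldl_append_if, List.filter_map]
  simp only [Function.comp_def, List.nil_append]

theorem b_fold_lines (hint? : Option String) (lines : List String)
    (d : PySem.Dict String (List String)) :
    lines.foldl (fun d line =>
      let toks := pvNormLine line
      let key := PySem.List.pyGetD toks 0 ""
      if key == "" || key == "#" then d
      else if hint?.any (fun hint => PySem.Str.isIn hint key) then PySem.Dict.empty
      else d.insert key (PySem.List.slice toks (some 1) none)) d
    = (lines.map pvNormLine).foldl (pvStepB' hint?) d := by
  induction lines generalizing d with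
  | nil => rfl
  | cons x xs ih =>
      simp only [List.foldl_cons, List.map_cons]
      exact ih (pvStepB' hint? d (pvNormLine x))

theorem step'_filter_some (hint : String) (ts : List (List String))
    (d : PySem.Dict String (List String)) :
    ts.foldl (pvStepB' (some hint)) d = (ts.filter pvKeep).foldl (pvStepB hint) d := by
  induction ts generalizing d with
  | nil => rfl
  | cons t ts ih =>
      simp only [List.foldl_cons, List.filter_cons]
      cases h : pvKeep t with
      | false =>
          have hskip : (PySem.List.pyGetD t 0 "" == "" || PySem.List.pyGetD t 0 "" == "#") = true := by
            have hh := pvSkip_eq_not_keep t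
            simp only [pvKey] at hh
            rw [hh, h]; rfl
          have hstep : pvStepB' (some hint) d t = d := by
            unfold pvStepB'; rw [hskip]; rfl
          rw [hstep, ih]
          simp only [Bool.false_eq_true, reduceIte]
      | true =>
          have hskip : (PySem.List.pyGetD t 0 "" == "" || PySem.List.pyGetD t 0 "" == "#") = false := by
            have hh := pvSkip_eq_not_keep t
            simp only [pvKey] at hh
            rw [hh, h]; rfl
          have hstep : pvStepB' (some hint) d t = pvStepB hint d t := by
            unfold pvStepB' pvStepB pvHdr pvIns pvKey
            rw [hskip]
            simp only [Option.any_some, Bool.false_eq_true, reduceIte]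
            rfl
          rw [hstep, ih]
          simp only [reduceIte, List.foldl_cons]

theorem step'_filter_none (ts : List (List String)) (d : PySem.Dict String (List String)) :
    ts.foldl (pvStepB' none) d = (ts.filter pvKeep).foldl pvIns d := by
  induction ts generalizing d with
  | nil => rfl
  | cons t ts ih =>
      simp only [List.foldl_cons, List.filter_cons]
      cases h : pvKeep t with
      | false =>
          have hskip : (PySem.List.pyGetD t 0 "" == "" || PySem.List.pyGetD t 0 "" == "#") = true := by
            have hh := pvSkip_eq_not_keep t
            simp only [pvKey] at hh
            rw [hh, h]; rfl
          have hstep : pvStepB' none d t = d := by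
            unfold pvStepB'; rw [hskip]; rfl
          rw [hstep, ih]
          simp only [Bool.false_eq_true, reduceIte]
      | true =>
          have hskip : (PySem.List.pyGetD t 0 "" == "" || PySem.List.pyGetD t 0 "" == "#") = false := by
            have hh := pvSkip_eq_not_keep t
            simp only [pvKey] at hh
            rw [hh, h]; rfl
          have hstep : pvStepB' none d t = pvIns d t := by
            unfold pvStepB' pvIns pvKey
            rw [hskip]; rfl
          rw [hstep, ih]
          simp only [reduceIte, List.foldl_cons]

def pvAfterLast (p : List String → Bool) : List (List String) → Option (List (List String))
  | [] => none
  | r :: rs => match pvAfterLast p rs with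
    | some t => some t
    | none => if p r then some rs else none

theorem stepB_fold_afterLast (hint : String) (rows : List (List String))
    (d : PySem.Dict String (List String)) :
    rows.foldl (pvStepB hint) d =
      match pvAfterLast (pvHdr hint) rows with
      | none => rows.foldl pvIns d
      | some t => t.foldl pvIns PySem.Dict.empty := by
  induction rows generalizing d with
  | nil => rfl
  | cons r rs ih =>
      simp only [List.foldl_cons, pvAfterLast]
      cases hrs : pvAfterLast (pvHdr hint) rs with
      | some t =>
          cases hr : pvHdr hint r with
          | true =>
              rw [show pvStepB hint d r = PySem.Dict.empty from by unfold pvStepB; rw [hr]; rfl]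
              rw [ih, hrs]
          | false =>
              rw [show pvStepB hint d r = pvIns d r from by unfold pvStepB; rw [hr]; rfl]
              rw [ih, hrs]
      | none =>
          cases hr : pvHdr hint r with
          | true =>
              rw [show pvStepB hint d r = PySem.Dict.empty from by unfold pvStepB; rw [hr]; rfl]
              rw [ih, hrs]
              simp only [reduceIte]
          | false =>
              rw [show pvStepB hint d r = pvIns d r from by unfold pvStepB; rw [hr]; rfl]
              rw [ih, hrs]
              simp only [Bool.false_eq_true, reduceIte]

theorem inds_afterLast (hint : String) (rows : List (List String)) (s : Int) :
    match pvAfterLast (pvHdr hint) rows with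
    | none => ((PySem.List.enumerate (rows.map pvKey) s).filter
        (fun q => PySem.Str.isIn hint q.2)).map (fun q => q.1) = []
    | some t => ∃ k : Nat,
        (((PySem.List.enumerate (rows.map pvKey) s).filter
          (fun q => PySem.Str.isIn hint q.2)).map (fun q => q.1)).getLast? = some (s + k) ∧
        rows.drop (k + 1) = t := by
  induction rows generalizing s with
  | nil => simp [pvAfterLast, PySem.List.enumerate_nil]
  | cons r rs ih =>
      simp only [List.map_cons, PySem.List.enumerate_cons, List.filter_cons, pvAfterLast]
      cases hrs : pvAfterLast (pvHdr hint) rs with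
      | some t =>
          have ih' := ih (s + 1)
          rw [hrs] at ih'
          obtain ⟨k, hlast, hdrop⟩ := ih'
          refine ⟨k + 1, ?_, by simpa using hdrop⟩
          have hne : ((PySem.List.enumerate (rs.map pvKey) (s + 1)).filter
              (fun q => PySem.Str.isIn hint q.2)).map (fun q => q.1) ≠ [] := by
            intro hnil; rw [hnil] at hlast; simp at hlast
          have hoff : s + ((k : Int) + 1) = s + 1 + (k : Int) := by ring
          cases hr : pvHdr hint r with
          | true =>
              simp only [pvHdr] at hr
              simp only [hr, reduceIte, List.map_cons]
              rw [show (s :: ((PySem.List.enumerate (rs.map pvKey) (s + 1)).filter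
                    (fun q => PySem.Str.isIn hint q.2)).map (fun q => q.1))
                  = [s] ++ ((PySem.List.enumerate (rs.map pvKey) (s + 1)).filter
                    (fun q => PySem.Str.isIn hint q.2)).map (fun q => q.1) from rfl,
                List.getLast?_append_of_ne_nil _ hne, hlast]
              congr 1
              push_cast
              ring
          | false =>
              simp only [pvHdr] at hr
              simp only [hr, Bool.false_eq_true, reduceIte, hlast]
              congr 1
              push_cast
              ring
      | none =>
          have ih' := ih (s + 1)
          rw [hrs] at ih'
          cases hr : pvHdr hint r with
          | true =>
              simp only [pvHdr] at hr
              refine ⟨0, ?_, by simp⟩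
              simp only [hr, reduceIte, List.map_cons, ih']
              simp
          | false =>
              simp only [pvHdr] at hr
              simp only [hr, Bool.false_eq_true, reduceIte]
              exact ih'

-- ===== VERDICT (by name: the statement is the Claim_ definition above) =====
theorem sanitise_lines_spec : Claim_equal_sanitise_lines := by
  intro lines hint? _
  show sanitise_lines lines hint? = sanitise_lines_alt lines hint?
  cases hint? with
  | none =>
      have hB : sanitise_lines_alt lines none
          = (((lines.map pvNormLine).filter pvKeep).foldl pvIns PySem.Dict.empty).items :=
        congrArg PySem.Dict.items ((b_fold_lines none lines PySem.Dict.empty).trans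
          (step'_filter_none (lines.map pvNormLine) PySem.Dict.empty))
      have hA : sanitise_lines lines none
          = (((lines.map pvNormLine).filter pvKeep).foldl pvIns PySem.Dict.empty).items :=
        congrArg (fun l : List (List String) => (l.foldl pvIns PySem.Dict.empty).items)
          (pkg_info_eq lines)
      rw [hA, hB]
  | some hint =>
      have hB : sanitise_lines_alt lines (some hint)
          = (((lines.map pvNormLine).filter pvKeep).foldl (pvStepB hint) PySem.Dict.empty).items :=
        congrArg PySem.Dict.items ((b_fold_lines (some hint) lines PySem.Dict.empty).trans
          (step'_filter_some hint (lines.map pvNormLine) PySem.Dict.empty))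
      have hA : sanitise_lines lines (some hint)
          = ((if (((PySem.List.enumerate ((((lines.map pvNormLine).filter pvKeep)).map pvKey) 0).filter
                (fun q => PySem.Str.isIn hint q.2)).map (fun q => q.1)).length > 0
              then PySem.List.slice ((lines.map pvNormLine).filter pvKeep)
                (some (PySem.List.pyGetD (((PySem.List.enumerate
                  ((((lines.map pvNormLine).filter pvKeep)).map pvKey) 0).filter
                  (fun q => PySem.Str.isIn hint q.2)).map (fun q => q.1)) (-1) 0 + 1)) none
              else (lines.map pvNormLine).filter pvKeep).foldl pvIns PySem.Dict.empty).items :=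
        congrArg (fun l : List (List String) =>
          ((if (((PySem.List.enumerate (l.map pvKey) 0).filter
                (fun q => PySem.Str.isIn hint q.2)).map (fun q => q.1)).length > 0
            then PySem.List.slice l
              (some (PySem.List.pyGetD (((PySem.List.enumerate (l.map pvKey) 0).filter
                (fun q => PySem.Str.isIn hint q.2)).map (fun q => q.1)) (-1) 0 + 1)) none
            else l).foldl pvIns PySem.Dict.empty).items) (pkg_info_eq lines)
      rw [hA, hB, stepB_fold_afterLast]
      have h := inds_afterLast hint ((lines.map pvNormLine).filter pvKeep) 0
      cases hal : pvAfterLast (pvHdr hint) ((lines.map pvNormLine).filter pvKeep) with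
      | none =>
          rw [hal] at h
          rw [h]
          simp only [List.length_nil, gt_iff_lt, Nat.lt_irrefl, reduceIte]
      | some t =>
          rw [hal] at h
          obtain ⟨k, hlast, hdrop⟩ := h
          have hne : (((PySem.List.enumerate ((((lines.map pvNormLine).filter pvKeep)).map pvKey)
              0).filter (fun q => PySem.Str.isIn hint q.2)).map (fun q => q.1)) ≠ [] := by
            intro hnil; rw [hnil] at hlast; simp at hlast
          have hlen : (((PySem.List.enumerate ((((lines.map pvNormLine).filter pvKeep)).map pvKey)
              0).filter (fun q => PySem.Str.isIn hint q.2)).map (fun q => q.1)).length > 0 :=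
            List.length_pos_iff.mpr hne
          rw [if_pos hlen]
          have hlastD : PySem.List.pyGetD (((PySem.List.enumerate
              ((((lines.map pvNormLine).filter pvKeep)).map pvKey) 0).filter
              (fun q => PySem.Str.isIn hint q.2)).map (fun q => q.1)) (-1) 0 = (0 : Int) + k := by
            rw [PySem.List.pyGetD_neg_one _ 0 hne]
            rw [List.getLast?_eq_some_getLast hne] at hlast
            exact Option.some.inj hlast
          rw [hlastD]
          have hcast : (0 : Int) + (k : Int) + 1 = ((k + 1 : Nat) : Int) := by push_cast; ring
          rw [hcast, PySem.List.slice_from_natCast, hdrop]
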